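-- pv_equiv track=rewrite | github.com/Carom-Helper/Carom-API-Server | src/detection/detect/ImageRotationPipe.py | check_aline_corners
-- ===== SOURCE A (Python) =====
-- def check_aline_corners(width, top_left, top_right, bottom_left, bottom_right)-> bool:
--     # top_left, top_right, bottom_left, bottom_right 들의 배치가 잘 맞는지 확인해 주는 함수
--     origin_list = [top_left, top_right, bottom_left, bottom_right]
--     sorted_list = [top_left, top_right, bottom_left, bottom_right]
--     sorted_list.sort(key=lambda x:x[0] + x[1]*width)
--
--     for origin, sorted in zip(origin_list,sorted_list):
--         if origin != sorted:
--             return False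
--     return True
-- ===== SOURCE B (Python) =====
-- def check_aline_corners(width, top_left, top_right, bottom_left, bottom_right) -> bool:
--     # The original sorts (stably) by key x[0] + x[1]*width and compares; with a
--     # stable sort the sorted copy equals the original exactly when the keys are
--     # already non-decreasing, so just check the keys in one pass without sorting.
--     keys = [p[0] + p[1] * width for p in (top_left, top_right, bottom_left, bottom_right)]
--     return all(a <= b for a, b in zip(keys, keys[1:]))
-- ===== Notes on version B (the rewrite author's own statement) =====
-- stated objective: simpler
-- what changed: Replaces building a stably-sorted copy and comparing it element-by-element with a single pass that checks the four position keys are non-decreasing (no sort, no paired comparison).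
import Mathlib
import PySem

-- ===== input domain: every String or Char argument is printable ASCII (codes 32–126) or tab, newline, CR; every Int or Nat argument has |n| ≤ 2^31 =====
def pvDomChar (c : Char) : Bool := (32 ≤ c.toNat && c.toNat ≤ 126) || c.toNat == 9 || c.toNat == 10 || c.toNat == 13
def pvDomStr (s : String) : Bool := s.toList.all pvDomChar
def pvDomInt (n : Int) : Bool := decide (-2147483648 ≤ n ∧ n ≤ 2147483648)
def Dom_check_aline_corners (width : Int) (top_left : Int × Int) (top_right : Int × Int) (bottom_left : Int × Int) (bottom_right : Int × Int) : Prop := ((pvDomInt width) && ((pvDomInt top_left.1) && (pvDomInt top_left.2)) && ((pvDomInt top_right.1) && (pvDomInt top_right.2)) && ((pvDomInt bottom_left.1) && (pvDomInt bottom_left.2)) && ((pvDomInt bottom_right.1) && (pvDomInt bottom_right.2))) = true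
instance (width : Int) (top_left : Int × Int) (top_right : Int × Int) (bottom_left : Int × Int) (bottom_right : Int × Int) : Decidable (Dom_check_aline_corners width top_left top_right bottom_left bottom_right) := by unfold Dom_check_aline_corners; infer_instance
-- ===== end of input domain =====

-- ===== PORT A =====
-- B replaces A's sort-then-compare with a single non-decreasing check of the keys (simpler; same cost).

-- the early-return comparison loop: for origin, sorted in zip(...): if origin != sorted: return False
def caLoop : List ((Int × Int) × (Int × Int)) → Bool
  | [] => true
  | (o, s) :: rest => if o ≠ s then false else caLoop rest

def check_aline_corners (width : Int) (top_left : Int × Int) (top_right : Int × Int) (bottom_left : Int × Int) (bottom_right : Int × Int) : Bool :=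
  let origin_list : List (Int × Int) := [top_left, top_right, bottom_left, bottom_right]
  let sorted_list : List (Int × Int) :=
    PySem.List.sorted [top_left, top_right, bottom_left, bottom_right] (fun x => x.1 + x.2 * width) false
  caLoop (origin_list.zip sorted_list)

-- ===== PORT B =====
def check_aline_corners_alt (width : Int) (top_left : Int × Int) (top_right : Int × Int) (bottom_left : Int × Int) (bottom_right : Int × Int) : Bool :=
  let keys : List Int :=
    [top_left, top_right, bottom_left, bottom_right].map (fun p => p.1 + p.2 * width)
  (keys.zip keys.tail).all (fun ab => ab.1 ≤ ab.2)

-- ===== PRECONDITION & SPEC =====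
def Spec_check_aline_corners (width : Int) (top_left : Int × Int) (top_right : Int × Int) (bottom_left : Int × Int) (bottom_right : Int × Int) (out : Bool) : Prop := out = check_aline_corners_alt width top_left top_right bottom_left bottom_right
instance (width : Int) (top_left : Int × Int) (top_right : Int × Int) (bottom_left : Int × Int) (bottom_right : Int × Int) (out : Bool) : Decidable (Spec_check_aline_corners width top_left top_right bottom_left bottom_right out) := by unfold Spec_check_aline_corners; infer_instance

-- ===== CLAIM (what is proved, stated in full; the proofs are below) =====
def Claim_equal_check_aline_corners : Prop := ∀ (width : Int) (top_left : Int × Int) (top_right : Int × Int) (bottom_left : Int × Int) (bottom_right : Int × Int), Dom_check_aline_corners width top_left top_right bottom_left bottom_right → Spec_check_aline_corners width top_left top_right bottom_left bottom_right (check_aline_corners width top_left top_right bottom_left bottom_right)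

-- ===== LEMMAS AND PROOFS =====

-- the comparison loop over a zip of equal-length lists accepts exactly equal lists
theorem caLoop_zip_eq_true_iff (xs ys : List (Int × Int)) (h : xs.length = ys.length) :
    caLoop (xs.zip ys) = true ↔ xs = ys := by
  induction xs generalizing ys with
  | nil => cases ys with
    | nil => simp [caLoop]
    | cons y t => simp at h
  | cons x xt ih =>
    cases ys with
    | nil => simp at h
    | cons y yt =>
      simp only [List.zip_cons_cons, caLoop]
      by_cases hxy : x = y
      · subst hxy
        simp only [ne_eq, not_true_eq_false, if_false, List.cons.injEq, true_and]
        exact ih yt (by simpa using h)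
      · simp [hxy]

theorem check_aline_corners_spec' (width : Int) (tl tr bl br : Int × Int) :
    check_aline_corners width tl tr bl br = check_aline_corners_alt width tl tr bl br := by
  set k : (Int × Int) → Int := fun p => p.1 + p.2 * width with hk
  have hlen : ([tl, tr, bl, br] : List (Int × Int)).length =
      (PySem.List.sorted [tl, tr, bl, br] k false).length := by
    simp [PySem.List.length_sorted]
  rw [Bool.eq_iff_iff]
  unfold check_aline_corners check_aline_corners_alt
  rw [caLoop_zip_eq_true_iff _ _ hlen]
  simp only [List.map_cons, List.map_nil, List.tail_cons, List.zip_cons_cons, List.zip_nil_right,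
    List.all_cons, List.all_nil, Bool.and_true, Bool.and_eq_true, decide_eq_true_eq]
  constructor
  · intro hsorted
    have hp : ([tl, tr, bl, br] : List (Int × Int)).Pairwise (fun a b => k a ≤ k b) := by
      rw [hsorted]
      exact PySem.List.sorted_pairwise [tl, tr, bl, br] k
    simp only [List.pairwise_cons, List.mem_cons, List.not_mem_nil] at hp
    refine ⟨hp.1 tr (by simp), hp.2.1 bl (by simp), hp.2.2.1 br (by simp)⟩
  · rintro ⟨h1, h2, h3⟩
    symm
    apply PySem.List.sorted_eq_self_of_pairwise
    simp only [List.pairwise_cons, List.mem_cons, List.not_mem_nil, or_false]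
    refine ⟨?_, ?_, ?_, fun _ h => h.elim, List.Pairwise.nil⟩
    · rintro a (rfl | rfl | rfl) <;> simp only [hk] <;> omega
    · rintro a (rfl | rfl) <;> simp only [hk] <;> omega
    · rintro a rfl; simp only [hk]; omega

-- ===== VERDICT (by name: the statement is the Claim_ definition above) =====
theorem check_aline_corners_spec : Claim_equal_check_aline_corners := by
  intro width tl tr bl br _
  unfold Spec_check_aline_corners
  exact check_aline_corners_spec' width tl tr bl br
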